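-- pv_equiv track=rewrite | github.com/zhuxiangqun/RANGEN-V2 | evaluation_system/analyzers/quality_analyzer.py | _categorize_errors
-- ===== SOURCE A (Python) =====
-- from typing import Dict, Any, List
--
-- def _categorize_errors(errors: List[str]) -> Dict[str, int]:
--     """对错误进行分类"""
--     categories = {
--         "connection": 0,
--         "timeout": 0,
--         "validation": 0,
--         "permission": 0,
--         "resource": 0,
--         "data": 0,
--         "system": 0,
--         "other": 0
--     }
--
--     for error in errors:
--         error_lower = error.lower()
--         if any(keyword in error_lower for keyword in ['connection', 'connect', 'network']):
--             categories["connection"] += 1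
--         elif any(keyword in error_lower for keyword in ['timeout', 'time out']):
--             categories["timeout"] += 1
--         elif any(keyword in error_lower for keyword in ['validation', 'valid', 'invalid']):
--             categories["validation"] += 1
--         elif any(keyword in error_lower for keyword in ['permission', 'access', 'denied']):
--             categories["permission"] += 1
--         elif any(keyword in error_lower for keyword in ['memory', 'resource', 'disk']):
--             categories["resource"] += 1
--         elif any(keyword in error_lower for keyword in ['data', 'format', 'parse']):
--             categories["data"] += 1
--         elif any(keyword in error_lower for keyword in ['system', 'os', 'platform']):
--             categories["system"] += 1
--         else:
--             categories["other"] += 1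
--
--     return categories
-- ===== SOURCE B (Python) =====
-- from typing import Dict, List
--
-- _CATEGORY_TABLE = [
--     ("connection", ['connection', 'connect', 'network']),
--     ("timeout", ['timeout', 'time out']),
--     ("validation", ['validation', 'valid', 'invalid']),
--     ("permission", ['permission', 'access', 'denied']),
--     ("resource", ['memory', 'resource', 'disk']),
--     ("data", ['data', 'format', 'parse']),
--     ("system", ['system', 'os', 'platform']),
-- ]
--
-- def _categorize_errors(errors: List[str]) -> Dict[str, int]:
--     # Category-major staged sieve: instead of classifying each error by a
--     # branch cascade, repeatedly split the remaining (lowercased) errors by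
--     # the current category's keywords; whatever survives every sieve is "other".
--     remaining = [error.lower() for error in errors]
--     counts = {}
--     for category, keywords in _CATEGORY_TABLE:
--         matched = [e for e in remaining if any(k in e for k in keywords)]
--         remaining = [e for e in remaining if not any(k in e for k in keywords)]
--         counts[category] = len(matched)
--     counts["other"] = len(remaining)
--     return counts
-- ===== Notes on version B (the rewrite author's own statement) =====
-- stated objective: alternative
-- what changed: Replaces A's error-major single pass with an eight-way if/elif cascade by a category-major staged sieve: the lowercased errors are filtered once per category in priority order, each stage records how many it captured and passes the unmatched rest on, and the survivors of all stages are 'other'.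
import Mathlib
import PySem

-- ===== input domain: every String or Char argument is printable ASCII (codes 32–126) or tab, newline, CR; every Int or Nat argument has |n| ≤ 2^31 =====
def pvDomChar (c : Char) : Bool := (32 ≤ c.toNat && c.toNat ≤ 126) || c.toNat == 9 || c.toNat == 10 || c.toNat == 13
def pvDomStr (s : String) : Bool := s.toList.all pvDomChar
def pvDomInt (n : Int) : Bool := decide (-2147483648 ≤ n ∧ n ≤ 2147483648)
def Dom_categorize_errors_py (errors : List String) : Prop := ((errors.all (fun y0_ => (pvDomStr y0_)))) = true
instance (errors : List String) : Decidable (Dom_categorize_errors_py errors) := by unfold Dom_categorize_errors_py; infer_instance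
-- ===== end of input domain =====

-- B replaces A's error-major if/elif cascade by a category-major staged sieve over the
-- lowercased errors (filter per category in priority order, survivors are "other"); same result.

-- ===== PORT A =====
-- literal transliteration of A: a dict of eight zeroed counters, then for each error
-- the if/elif chain of `any(keyword in error_lower …)` tests incrementing one slot.
def categorize_errors_py (errors : List String) : List (String × Int) :=
  let categories : PySem.Dict String Int :=
    ((((((((PySem.Dict.empty.insert "connection" 0).insert "timeout" 0).insert "validation" 0).insert
        "permission" 0).insert "resource" 0).insert "data" 0).insert "system" 0).insert "other" 0)
  (errors.foldl (fun cats error =>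
    let el := PySem.Str.lower error
    if (["connection", "connect", "network"] : List String).any (fun k => PySem.Str.isIn k el) then
      cats.insert "connection" (cats.getD "connection" 0 + 1)
    else if (["timeout", "time out"] : List String).any (fun k => PySem.Str.isIn k el) then
      cats.insert "timeout" (cats.getD "timeout" 0 + 1)
    else if (["validation", "valid", "invalid"] : List String).any (fun k => PySem.Str.isIn k el) then
      cats.insert "validation" (cats.getD "validation" 0 + 1)
    else if (["permission", "access", "denied"] : List String).any (fun k => PySem.Str.isIn k el) then
      cats.insert "permission" (cats.getD "permission" 0 + 1)
    else if (["memory", "resource", "disk"] : List String).any (fun k => PySem.Str.isIn k el) then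
      cats.insert "resource" (cats.getD "resource" 0 + 1)
    else if (["data", "format", "parse"] : List String).any (fun k => PySem.Str.isIn k el) then
      cats.insert "data" (cats.getD "data" 0 + 1)
    else if (["system", "os", "platform"] : List String).any (fun k => PySem.Str.isIn k el) then
      cats.insert "system" (cats.getD "system" 0 + 1)
    else
      cats.insert "other" (cats.getD "other" 0 + 1)) categories).items

-- ===== PORT B =====
def pvCategoryTable : List (String × List String) :=
  [("connection", ["connection", "connect", "network"]),
   ("timeout", ["timeout", "time out"]),
   ("validation", ["validation", "valid", "invalid"]),
   ("permission", ["permission", "access", "denied"]),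
   ("resource", ["memory", "resource", "disk"]),
   ("data", ["data", "format", "parse"]),
   ("system", ["system", "os", "platform"])]

-- Source B's loop: per category in order, split the remaining lowered errors into
-- matched / unmatched, record the matched count, keep the rest; survivors are "other".
def categorize_errors_py_alt (errors : List String) : List (String × Int) :=
  let lowered := errors.map PySem.Str.lower
  let final := pvCategoryTable.foldl
    (fun (st : List String × List (String × Int)) row =>
      let matched := st.1.filter (fun e => row.2.any (fun k => PySem.Str.isIn k e))
      let rest := st.1.filter (fun e => !(row.2.any (fun k => PySem.Str.isIn k e)))
      (rest, st.2 ++ [(row.1, (matched.length : Int))]))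
    (lowered, [])
  final.2 ++ [("other", (final.1.length : Int))]

-- ===== PRECONDITION & SPEC =====
def Spec_categorize_errors_py (errors : List String) (out : List (String × Int)) : Prop := out = categorize_errors_py_alt errors
instance (errors : List String) (out : List (String × Int)) : Decidable (Spec_categorize_errors_py errors out) := by unfold Spec_categorize_errors_py; infer_instance

-- ===== CLAIM (what is proved, stated in full; the proofs are below) =====
def Claim_equal_categorize_errors_py : Prop := ∀ (errors : List String), Dom_categorize_errors_py errors → Spec_categorize_errors_py errors (categorize_errors_py errors)

-- ===== LEMMAS AND PROOFS =====

-- proof-only: the seven keyword tests on an (already lowered) string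
def pvM1 (x : String) : Bool := (["connection", "connect", "network"] : List String).any (fun k => PySem.Str.isIn k x)
def pvM2 (x : String) : Bool := (["timeout", "time out"] : List String).any (fun k => PySem.Str.isIn k x)
def pvM3 (x : String) : Bool := (["validation", "valid", "invalid"] : List String).any (fun k => PySem.Str.isIn k x)
def pvM4 (x : String) : Bool := (["permission", "access", "denied"] : List String).any (fun k => PySem.Str.isIn k x)
def pvM5 (x : String) : Bool := (["memory", "resource", "disk"] : List String).any (fun k => PySem.Str.isIn k x)
def pvM6 (x : String) : Bool := (["data", "format", "parse"] : List String).any (fun k => PySem.Str.isIn k x)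
def pvM7 (x : String) : Bool := (["system", "os", "platform"] : List String).any (fun k => PySem.Str.isIn k x)

-- proof-only abbreviation for the eight-slot counter dict A maintains
def pvD8 (n1 n2 n3 n4 n5 n6 n7 n8 : Int) : PySem.Dict String Int :=
  PySem.Dict.mk [("connection", n1), ("timeout", n2), ("validation", n3), ("permission", n4),
    ("resource", n5), ("data", n6), ("system", n7), ("other", n8)]

theorem pvStep_connection (n1 n2 n3 n4 n5 n6 n7 n8 : Int) :
    (pvD8 n1 n2 n3 n4 n5 n6 n7 n8).insert "connection" ((pvD8 n1 n2 n3 n4 n5 n6 n7 n8).getD "connection" 0 + 1)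
    = pvD8 (n1+1) n2 n3 n4 n5 n6 n7 n8 := by
  simp [pvD8, PySem.Dict.insert, PySem.Dict.getD, PySem.Dict.get?, PySem.Dict.contains]

theorem pvStep_timeout (n1 n2 n3 n4 n5 n6 n7 n8 : Int) :
    (pvD8 n1 n2 n3 n4 n5 n6 n7 n8).insert "timeout" ((pvD8 n1 n2 n3 n4 n5 n6 n7 n8).getD "timeout" 0 + 1)
    = pvD8 n1 (n2+1) n3 n4 n5 n6 n7 n8 := by
  simp [pvD8, PySem.Dict.insert, PySem.Dict.getD, PySem.Dict.get?, PySem.Dict.contains]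

theorem pvStep_validation (n1 n2 n3 n4 n5 n6 n7 n8 : Int) :
    (pvD8 n1 n2 n3 n4 n5 n6 n7 n8).insert "validation" ((pvD8 n1 n2 n3 n4 n5 n6 n7 n8).getD "validation" 0 + 1)
    = pvD8 n1 n2 (n3+1) n4 n5 n6 n7 n8 := by
  simp [pvD8, PySem.Dict.insert, PySem.Dict.getD, PySem.Dict.get?, PySem.Dict.contains]

theorem pvStep_permission (n1 n2 n3 n4 n5 n6 n7 n8 : Int) :
    (pvD8 n1 n2 n3 n4 n5 n6 n7 n8).insert "permission" ((pvD8 n1 n2 n3 n4 n5 n6 n7 n8).getD "permission" 0 + 1)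
    = pvD8 n1 n2 n3 (n4+1) n5 n6 n7 n8 := by
  simp [pvD8, PySem.Dict.insert, PySem.Dict.getD, PySem.Dict.get?, PySem.Dict.contains]

theorem pvStep_resource (n1 n2 n3 n4 n5 n6 n7 n8 : Int) :
    (pvD8 n1 n2 n3 n4 n5 n6 n7 n8).insert "resource" ((pvD8 n1 n2 n3 n4 n5 n6 n7 n8).getD "resource" 0 + 1)
    = pvD8 n1 n2 n3 n4 (n5+1) n6 n7 n8 := by
  simp [pvD8, PySem.Dict.insert, PySem.Dict.getD, PySem.Dict.get?, PySem.Dict.contains]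

theorem pvStep_data (n1 n2 n3 n4 n5 n6 n7 n8 : Int) :
    (pvD8 n1 n2 n3 n4 n5 n6 n7 n8).insert "data" ((pvD8 n1 n2 n3 n4 n5 n6 n7 n8).getD "data" 0 + 1)
    = pvD8 n1 n2 n3 n4 n5 (n6+1) n7 n8 := by
  simp [pvD8, PySem.Dict.insert, PySem.Dict.getD, PySem.Dict.get?, PySem.Dict.contains]

theorem pvStep_system (n1 n2 n3 n4 n5 n6 n7 n8 : Int) :
    (pvD8 n1 n2 n3 n4 n5 n6 n7 n8).insert "system" ((pvD8 n1 n2 n3 n4 n5 n6 n7 n8).getD "system" 0 + 1)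
    = pvD8 n1 n2 n3 n4 n5 n6 (n7+1) n8 := by
  simp [pvD8, PySem.Dict.insert, PySem.Dict.getD, PySem.Dict.get?, PySem.Dict.contains]

theorem pvStep_other (n1 n2 n3 n4 n5 n6 n7 n8 : Int) :
    (pvD8 n1 n2 n3 n4 n5 n6 n7 n8).insert "other" ((pvD8 n1 n2 n3 n4 n5 n6 n7 n8).getD "other" 0 + 1)
    = pvD8 n1 n2 n3 n4 n5 n6 n7 (n8+1) := by
  simp [pvD8, PySem.Dict.insert, PySem.Dict.getD, PySem.Dict.get?, PySem.Dict.contains]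

-- A's fold over a list of errors, characterised by countP of the staged predicates.
theorem categorize_errors_py_fold (es : List String)
    (n1 n2 n3 n4 n5 n6 n7 n8 : Int) :
    (es.foldl (fun cats error =>
      if (["connection", "connect", "network"] : List String).any (fun k => PySem.Str.isIn k (PySem.Str.lower error)) then
        cats.insert "connection" (cats.getD "connection" 0 + 1)
      else if (["timeout", "time out"] : List String).any (fun k => PySem.Str.isIn k (PySem.Str.lower error)) then
        cats.insert "timeout" (cats.getD "timeout" 0 + 1)
      else if (["validation", "valid", "invalid"] : List String).any (fun k => PySem.Str.isIn k (PySem.Str.lower error)) then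
        cats.insert "validation" (cats.getD "validation" 0 + 1)
      else if (["permission", "access", "denied"] : List String).any (fun k => PySem.Str.isIn k (PySem.Str.lower error)) then
        cats.insert "permission" (cats.getD "permission" 0 + 1)
      else if (["memory", "resource", "disk"] : List String).any (fun k => PySem.Str.isIn k (PySem.Str.lower error)) then
        cats.insert "resource" (cats.getD "resource" 0 + 1)
      else if (["data", "format", "parse"] : List String).any (fun k => PySem.Str.isIn k (PySem.Str.lower error)) then
        cats.insert "data" (cats.getD "data" 0 + 1)
      else if (["system", "os", "platform"] : List String).any (fun k => PySem.Str.isIn k (PySem.Str.lower error)) then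
        cats.insert "system" (cats.getD "system" 0 + 1)
      else
        cats.insert "other" (cats.getD "other" 0 + 1))
      (pvD8 n1 n2 n3 n4 n5 n6 n7 n8)) =
    pvD8 (n1 + (es.countP (fun e => pvM1 (PySem.Str.lower e)) : Int))
         (n2 + (es.countP (fun e => !pvM1 (PySem.Str.lower e) && pvM2 (PySem.Str.lower e)) : Int))
         (n3 + (es.countP (fun e => !pvM1 (PySem.Str.lower e) && !pvM2 (PySem.Str.lower e) && pvM3 (PySem.Str.lower e)) : Int))
         (n4 + (es.countP (fun e => !pvM1 (PySem.Str.lower e) && !pvM2 (PySem.Str.lower e) && !pvM3 (PySem.Str.lower e) && pvM4 (PySem.Str.lower e)) : Int))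
         (n5 + (es.countP (fun e => !pvM1 (PySem.Str.lower e) && !pvM2 (PySem.Str.lower e) && !pvM3 (PySem.Str.lower e) && !pvM4 (PySem.Str.lower e) && pvM5 (PySem.Str.lower e)) : Int))
         (n6 + (es.countP (fun e => !pvM1 (PySem.Str.lower e) && !pvM2 (PySem.Str.lower e) && !pvM3 (PySem.Str.lower e) && !pvM4 (PySem.Str.lower e) && !pvM5 (PySem.Str.lower e) && pvM6 (PySem.Str.lower e)) : Int))
         (n7 + (es.countP (fun e => !pvM1 (PySem.Str.lower e) && !pvM2 (PySem.Str.lower e) && !pvM3 (PySem.Str.lower e) && !pvM4 (PySem.Str.lower e) && !pvM5 (PySem.Str.lower e) && !pvM6 (PySem.Str.lower e) && pvM7 (PySem.Str.lower e)) : Int))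
         (n8 + (es.countP (fun e => !pvM1 (PySem.Str.lower e) && !pvM2 (PySem.Str.lower e) && !pvM3 (PySem.Str.lower e) && !pvM4 (PySem.Str.lower e) && !pvM5 (PySem.Str.lower e) && !pvM6 (PySem.Str.lower e) && !pvM7 (PySem.Str.lower e)) : Int)) := by
  induction es generalizing n1 n2 n3 n4 n5 n6 n7 n8 with
  | nil => simp
  | cons e es ih =>
    simp only [List.foldl_cons]
    split_ifs with h1 h2 h3 h4 h5 h6 h7
    · rw [pvStep_connection, ih]
      simp only [pvD8, List.countP_cons, pvM1, pvM2, pvM3, pvM4, pvM5, pvM6, pvM7,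
        h1,
        Bool.not_true, Bool.not_false, Bool.true_and, Bool.false_and, Bool.and_true, Bool.and_false,
        eq_self_iff_true, if_true, Bool.false_eq_true, if_false,
        PySem.Dict.mk.injEq, List.cons.injEq, Prod.mk.injEq, true_and, and_true]
      omega
    · rw [pvStep_timeout, ih]
      simp only [Bool.not_eq_true] at h1
      simp only [pvD8, List.countP_cons, pvM1, pvM2, pvM3, pvM4, pvM5, pvM6, pvM7,
        h1, h2,
        Bool.not_true, Bool.not_false, Bool.true_and, Bool.false_and, Bool.and_true, Bool.and_false,
        eq_self_iff_true, if_true, Bool.false_eq_true, if_false,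
        PySem.Dict.mk.injEq, List.cons.injEq, Prod.mk.injEq, true_and, and_true]
      omega
    · rw [pvStep_validation, ih]
      simp only [Bool.not_eq_true] at h1 h2
      simp only [pvD8, List.countP_cons, pvM1, pvM2, pvM3, pvM4, pvM5, pvM6, pvM7,
        h1, h2, h3,
        Bool.not_true, Bool.not_false, Bool.true_and, Bool.false_and, Bool.and_true, Bool.and_false,
        eq_self_iff_true, if_true, Bool.false_eq_true, if_false,
        PySem.Dict.mk.injEq, List.cons.injEq, Prod.mk.injEq, true_and, and_true]
      omega
    · rw [pvStep_permission, ih]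
      simp only [Bool.not_eq_true] at h1 h2 h3
      simp only [pvD8, List.countP_cons, pvM1, pvM2, pvM3, pvM4, pvM5, pvM6, pvM7,
        h1, h2, h3, h4,
        Bool.not_true, Bool.not_false, Bool.true_and, Bool.false_and, Bool.and_true, Bool.and_false,
        eq_self_iff_true, if_true, Bool.false_eq_true, if_false,
        PySem.Dict.mk.injEq, List.cons.injEq, Prod.mk.injEq, true_and, and_true]
      omega
    · rw [pvStep_resource, ih]
      simp only [Bool.not_eq_true] at h1 h2 h3 h4
      simp only [pvD8, List.countP_cons, pvM1, pvM2, pvM3, pvM4, pvM5, pvM6, pvM7,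
        h1, h2, h3, h4, h5,
        Bool.not_true, Bool.not_false, Bool.true_and, Bool.false_and, Bool.and_true, Bool.and_false,
        eq_self_iff_true, if_true, Bool.false_eq_true, if_false,
        PySem.Dict.mk.injEq, List.cons.injEq, Prod.mk.injEq, true_and, and_true]
      omega
    · rw [pvStep_data, ih]
      simp only [Bool.not_eq_true] at h1 h2 h3 h4 h5
      simp only [pvD8, List.countP_cons, pvM1, pvM2, pvM3, pvM4, pvM5, pvM6, pvM7,
        h1, h2, h3, h4, h5, h6,
        Bool.not_true, Bool.not_false, Bool.true_and, Bool.false_and, Bool.and_true, Bool.and_false,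
        eq_self_iff_true, if_true, Bool.false_eq_true, if_false,
        PySem.Dict.mk.injEq, List.cons.injEq, Prod.mk.injEq, true_and, and_true]
      omega
    · rw [pvStep_system, ih]
      simp only [Bool.not_eq_true] at h1 h2 h3 h4 h5 h6
      simp only [pvD8, List.countP_cons, pvM1, pvM2, pvM3, pvM4, pvM5, pvM6, pvM7,
        h1, h2, h3, h4, h5, h6, h7,
        Bool.not_true, Bool.not_false, Bool.true_and, Bool.false_and, Bool.and_true, Bool.and_false,
        eq_self_iff_true, if_true, Bool.false_eq_true, if_false,
        PySem.Dict.mk.injEq, List.cons.injEq, Prod.mk.injEq, true_and, and_true]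
      omega
    · rw [pvStep_other, ih]
      simp only [Bool.not_eq_true] at h1 h2 h3 h4 h5 h6 h7
      simp only [pvD8, List.countP_cons, pvM1, pvM2, pvM3, pvM4, pvM5, pvM6, pvM7,
        h1, h2, h3, h4, h5, h6, h7,
        Bool.not_true, Bool.not_false, Bool.true_and, Bool.false_and, Bool.and_true, Bool.and_false,
        eq_self_iff_true, if_true, Bool.false_eq_true, if_false,
        PySem.Dict.mk.injEq, List.cons.injEq, Prod.mk.injEq, true_and, and_true]
      omega

-- B's staged filters, reduced to countP over the original errors list.
theorem pvFilter_length_countP (es : List String) (p : String → Bool) :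
    ((es.map PySem.Str.lower).filter p).length = es.countP (fun e => p (PySem.Str.lower e)) := by
  induction es with
  | nil => rfl
  | cons e es ih =>
    simp only [List.map_cons, List.filter_cons, List.countP_cons]
    by_cases h : p (PySem.Str.lower e) <;> simp [h, ih]

-- countP only depends on the pointwise value of the predicate.
theorem pvCountP_ext (es : List String) (p q : String → Bool) (h : ∀ e, p e = q e) :
    es.countP p = es.countP q :=
  List.countP_congr (fun a _ => by rw [h a])

-- ===== VERDICT (by name: the statement is the Claim_ definition above) =====
set_option maxHeartbeats 2000000 in
theorem categorize_errors_py_spec : Claim_equal_categorize_errors_py := by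
  intro errors _
  unfold Spec_categorize_errors_py categorize_errors_py categorize_errors_py_alt
  have hinit : ((((((((PySem.Dict.empty.insert "connection" (0:Int)).insert "timeout" 0).insert "validation" 0).insert
      "permission" 0).insert "resource" 0).insert "data" 0).insert "system" 0).insert "other" 0)
      = pvD8 0 0 0 0 0 0 0 0 := by decide
  dsimp only
  rw [hinit, categorize_errors_py_fold]
  simp only [pvCategoryTable, List.foldl_cons, List.foldl_nil, List.filter_filter]
  rw [pvFilter_length_countP, pvFilter_length_countP, pvFilter_length_countP,
     pvFilter_length_countP, pvFilter_length_countP, pvFilter_length_countP,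
     pvFilter_length_countP, pvFilter_length_countP]
  simp only [pvD8, PySem.Dict.items, zero_add, List.cons_append, List.nil_append,
    List.cons.injEq, Prod.mk.injEq, Nat.cast_inj, true_and, and_true]
  and_intros <;>
    exact pvCountP_ext _ _ _ (fun e => by
      simp only [pvM1, pvM2, pvM3, pvM4, pvM5, pvM6, pvM7] <;> ac_rfl)
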